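-- pv_equiv track=rewrite | github.com/groupthinking/vision | OpenAI_Hub/projects/EventRelay/src/youtube_extension/services/agents/adapters/action_implementer_agent.py | _create_difficulty_progression
-- ===== SOURCE A (Python) =====
-- from typing import Dict, Any, List, Optional
--
-- def _create_difficulty_progression(primary_actions: List[Dict[str, Any]]) -> List[str]:
--     """Create difficulty progression path"""
--     difficulties = ["beginner", "intermediate", "advanced"]
--     progression = []
--
--     for action in primary_actions:
--         difficulty = action.get("difficulty", "intermediate")
--         if difficulty not in progression:
--             progression.append(difficulty)
--
--     # Ensure logical order
--     ordered_progression = []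
--     for diff in difficulties:
--         if diff in progression:
--             ordered_progression.append(diff)
--
--     return ordered_progression
-- ===== SOURCE B (Python) =====
-- def _create_difficulty_progression(primary_actions):
--     """Create difficulty progression path"""
--     return [d for d in ("beginner", "intermediate", "advanced")
--             if any(action.get("difficulty", "intermediate") == d
--                    for action in primary_actions)]
-- ===== Notes on version B (the rewrite author's own statement) =====
-- stated objective: idiomatic
-- what changed: B drops A's dedup-then-reorder two-phase construction: it iterates the fixed label order once and includes each label iff any action carries it, so no intermediate 'progression' collection exists.
import Mathlib
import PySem

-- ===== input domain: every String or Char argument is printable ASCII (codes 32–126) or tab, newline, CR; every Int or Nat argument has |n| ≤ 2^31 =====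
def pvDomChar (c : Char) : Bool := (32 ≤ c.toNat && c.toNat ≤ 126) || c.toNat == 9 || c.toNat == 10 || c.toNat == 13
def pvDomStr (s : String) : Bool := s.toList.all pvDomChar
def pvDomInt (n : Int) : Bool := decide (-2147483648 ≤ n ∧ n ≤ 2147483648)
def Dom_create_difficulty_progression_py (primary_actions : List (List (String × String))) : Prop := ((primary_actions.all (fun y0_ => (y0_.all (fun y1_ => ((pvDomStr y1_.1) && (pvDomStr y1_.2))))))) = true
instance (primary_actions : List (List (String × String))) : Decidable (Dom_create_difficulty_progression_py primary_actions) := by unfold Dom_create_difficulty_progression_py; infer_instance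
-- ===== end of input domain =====

-- ===== PORT A =====
-- A: collect first-occurrence difficulty labels, then filter the fixed order by membership.
def pvProgression (primary_actions : List (List (String × String))) : List String :=
  primary_actions.foldl
    (fun progression action =>
      let difficulty := PySem.Dict.getD (PySem.Dict.mk action) "difficulty" "intermediate"
      if difficulty ∈ progression then progression else progression ++ [difficulty])
    []

def create_difficulty_progression_py (primary_actions : List (List (String × String))) : List String :=
  let progression := pvProgression primary_actions
  ["beginner", "intermediate", "advanced"].foldl
    (fun ordered diff => if diff ∈ progression then ordered ++ [diff] else ordered)
    []

-- ===== PORT B =====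
-- B: one pass over the fixed label order; a label is kept iff some action carries it.
def create_difficulty_progression_py_alt (primary_actions : List (List (String × String))) : List String :=
  ["beginner", "intermediate", "advanced"].filter
    (fun d => primary_actions.any (fun action => PySem.Dict.getD (PySem.Dict.mk action) "difficulty" "intermediate" == d))

-- ===== PRECONDITION & SPEC =====
def Spec_create_difficulty_progression_py (primary_actions : List (List (String × String))) (out : List String) : Prop := out = create_difficulty_progression_py_alt primary_actions
instance (primary_actions : List (List (String × String))) (out : List String) : Decidable (Spec_create_difficulty_progression_py primary_actions out) := by unfold Spec_create_difficulty_progression_py; infer_instance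

-- ===== CLAIM (what is proved, stated in full; the proofs are below) =====
def Claim_equal_create_difficulty_progression_py : Prop := ∀ (primary_actions : List (List (String × String))), Dom_create_difficulty_progression_py primary_actions → Spec_create_difficulty_progression_py primary_actions (create_difficulty_progression_py primary_actions)

-- ===== LEMMAS AND PROOFS =====
theorem mem_pvProgression (primary_actions : List (List (String × String))) (d : String) :
    (d ∈ pvProgression primary_actions) ↔
      primary_actions.any (fun action => PySem.Dict.getD (PySem.Dict.mk action) "difficulty" "intermediate" == d) = true := by
  suffices h : ∀ (l : List (List (String × String))) (acc : List String),
      (d ∈ l.foldl (fun progression action =>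
          let difficulty := PySem.Dict.getD (PySem.Dict.mk action) "difficulty" "intermediate"
          if difficulty ∈ progression then progression else progression ++ [difficulty]) acc) ↔
        d ∈ acc ∨ l.any (fun action => PySem.Dict.getD (PySem.Dict.mk action) "difficulty" "intermediate" == d) = true by
    simpa [pvProgression] using h primary_actions []
  intro l
  induction l with
  | nil => simp
  | cons a t ih =>
      intro acc
      simp only [List.foldl_cons, List.any_cons, Bool.or_eq_true, beq_iff_eq, ih]
      by_cases hm : PySem.Dict.getD (PySem.Dict.mk a) "difficulty" "intermediate" ∈ acc
      · rw [if_pos hm]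
        constructor
        · rintro (h | h)
          · exact Or.inl h
          · exact Or.inr (Or.inr h)
        · rintro (h | h | h)
          · exact Or.inl h
          · exact Or.inl (h ▸ hm)
          · exact Or.inr h
      · rw [if_neg hm]
        simp only [List.mem_append, List.mem_cons, List.not_mem_nil, or_false, or_assoc,
          eq_comm]

-- The ordered filter loop of A is a List.filter over the fixed label list.
theorem foldl_mem_filter (fixed : List String) (p : List String) :
    fixed.foldl (fun ordered diff => if diff ∈ p then ordered ++ [diff] else ordered) [] =
      fixed.filter (fun d => decide (d ∈ p)) := by
  simpa using PySem.List.foldl_append_ite_eq_filter (p := fun d => d ∈ p) (l := fixed) (acc := [])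

-- ===== VERDICT (by name: the statement is the Claim_ definition above) =====
theorem create_difficulty_progression_py_spec : Claim_equal_create_difficulty_progression_py := by
  intro primary_actions _
  unfold Spec_create_difficulty_progression_py
  unfold create_difficulty_progression_py create_difficulty_progression_py_alt
  rw [foldl_mem_filter]
  apply List.filter_congr
  intro d _
  rw [Bool.eq_iff_iff, decide_eq_true_iff]
  exact mem_pvProgression primary_actions d
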